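-- pv_equiv track=rewrite | github.com/nikitaapatil/howtobangalore | process_user_articles.py | extract_metadata_from_markdown
-- ===== SOURCE A (Python) =====
-- def extract_metadata_from_markdown(content):
--     """Extract title and basic metadata from markdown."""
--     lines = content.split('\n')
--     title = ""
--
--     # Find the first H1 heading
--     for line in lines:
--         if line.startswith('# '):
--             title = line[2:].strip()
--             break
--
--     # Calculate reading time (approximately 200 words per minute)
--     word_count = len(content.split())
--     read_time = max(1, round(word_count / 200))
--
--     return title, f"{read_time} min read", word_count
-- ===== SOURCE B (Python) =====
-- def extract_metadata_from_markdown(content):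
--     """Extract title and basic metadata from markdown.
--
--     Word count by a single character scan (state machine) instead of
--     materialising content.split(); first H1 found via a generator.
--     """
--     word_count = 0
--     in_word = False
--     for ch in content:
--         if ch.isspace():
--             in_word = False
--         else:
--             if not in_word:
--                 word_count += 1
--             in_word = True
--     title = next((line[2:].strip()
--                   for line in content.split('\n')
--                   if line.startswith('# ')), "")
--     read_time = max(1, round(word_count / 200))
--     return title, f"{read_time} min read", word_count
-- ===== Notes on version B (the rewrite author's own statement) =====
-- stated objective: alternative
-- what changed: B computes the word count with a single character-scan state machine (in_word flag) instead of materialising the whole-content split() word list, and finds the first H1 title with a first-match generator/findSome lookup instead of A's break-loop.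
import Mathlib
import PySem

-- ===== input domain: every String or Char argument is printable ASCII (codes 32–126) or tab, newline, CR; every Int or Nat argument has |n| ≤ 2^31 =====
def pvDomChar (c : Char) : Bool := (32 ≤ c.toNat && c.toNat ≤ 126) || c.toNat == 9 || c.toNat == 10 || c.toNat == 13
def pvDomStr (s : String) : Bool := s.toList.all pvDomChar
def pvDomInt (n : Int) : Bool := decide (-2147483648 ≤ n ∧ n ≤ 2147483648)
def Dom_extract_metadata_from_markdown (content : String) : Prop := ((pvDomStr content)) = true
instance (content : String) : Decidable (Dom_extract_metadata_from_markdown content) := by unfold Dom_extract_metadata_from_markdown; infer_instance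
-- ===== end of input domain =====

-- B replaces A's whole-content split() (which materialises the word list) by a single
-- character-scan state machine for the word count, and finds the first H1 with a
-- findSome?-style lookup instead of A's break-loop; objective: alternative.

-- shared helper: Python's round(wc / 200) — round-half-even of wc/200; exact because the
-- only half-way values wc/200 (wc = 200q+100) are exactly representable doubles at the
-- word counts the domain's strings can produce.
def pyRound200 (wc : Nat) : Int :=
  let q : Int := wc / 200
  let r : Nat := wc % 200
  if r < 100 then q else if 100 < r then q + 1 else if q % 2 = 0 then q else q + 1

-- ===== PORT A =====
-- the 'for line in lines: … break' loop
def findTitleA : List String → String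
  | [] => ""
  | l :: ls =>
    if PySem.Str.startswith l "# " then PySem.Str.strip (PySem.Str.slice l (some 2) none)
    else findTitleA ls

def extract_metadata_from_markdown (content : String) : String × String × Int :=
  let lines := (PySem.Str.split? content "\n").getD []
  let title := findTitleA lines
  let word_count := (PySem.Str.split₀ content).length
  let read_time := max 1 (pyRound200 word_count)
  (title, PySem.Int.toStr read_time ++ " min read", (word_count : Int))

-- ===== PORT B =====
-- one step of B's character state machine: state = (in_word, word_count)
def scanStep (st : Bool × Nat) (c : Char) : Bool × Nat :=
  if PySem.Chars.isspace c then (false, st.2)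
  else (true, if st.1 then st.2 else st.2 + 1)

def extract_metadata_from_markdown_alt (content : String) : String × String × Int :=
  let word_count := (content.toList.foldl scanStep (false, 0)).2
  let title :=
    (((PySem.Str.split? content "\n").getD []).findSome? (fun line =>
      if PySem.Str.startswith line "# " then some (PySem.Str.strip (PySem.Str.slice line (some 2) none))
      else none)).getD ""
  let read_time := max 1 (pyRound200 word_count)
  (title, PySem.Int.toStr read_time ++ " min read", (word_count : Int))

-- ===== PRECONDITION & SPEC =====
def Spec_extract_metadata_from_markdown (content : String) (out : String × String × Int) : Prop := out = extract_metadata_from_markdown_alt content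
instance (content : String) (out : String × String × Int) : Decidable (Spec_extract_metadata_from_markdown content out) := by unfold Spec_extract_metadata_from_markdown; infer_instance

-- ===== CLAIM (what is proved, stated in full; the proofs are below) =====
def Claim_equal_extract_metadata_from_markdown : Prop := ∀ (content : String), Dom_extract_metadata_from_markdown content → Spec_extract_metadata_from_markdown content (extract_metadata_from_markdown content)

-- ===== LEMMAS AND PROOFS =====

-- words remaining in s when the scanner starts with flag inw
def countWords : List Char → Bool → Nat
  | [], _ => 0
  | c :: r, inw =>
    if PySem.Chars.isspace c then countWords r false
    else (if inw then 0 else 1) + countWords r true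

theorem foldl_scanStep (cs : List Char) : ∀ (b : Bool) (n : Nat),
    (cs.foldl scanStep (b, n)).2 = n + countWords cs b := by
  induction cs with
  | nil => intro b n; simp [countWords]
  | cons c r ih =>
    intro b n
    simp only [List.foldl_cons, scanStep, countWords]
    by_cases hs : PySem.Chars.isspace c
    · simp [hs, ih]
    · cases b <;> simp [hs, ih] <;> omega

theorem split₀go_length (cs : List Char) : ∀ (cur : List Char) (acc : List (List Char)),
    (PySem.Chars.split₀.go cs cur acc).length
      = acc.length + (if cur.isEmpty then 0 else 1) + countWords cs (!cur.isEmpty) := by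
  induction cs with
  | nil =>
    intro cur acc
    by_cases h : cur.isEmpty <;> simp [PySem.Chars.split₀.go, countWords, h]
  | cons c r ih =>
    intro cur acc
    by_cases hs : PySem.Chars.isspace c
    · by_cases h : cur.isEmpty
      · simp [PySem.Chars.split₀.go, hs, h, ih, countWords]
      · simp [PySem.Chars.split₀.go, hs, h, ih, countWords]
    · by_cases h : cur.isEmpty <;>
        simp [PySem.Chars.split₀.go, hs, h, ih, countWords] <;> omega

theorem split₀_length_eq_scan (cs : List Char) :
    (PySem.Chars.split₀ cs).length = (cs.foldl scanStep (false, 0)).2 := by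
  rw [foldl_scanStep cs false 0]
  simpa [PySem.Chars.split₀, countWords] using split₀go_length cs [] []

theorem findTitleA_eq_findSome (ls : List String) :
    findTitleA ls
      = (ls.findSome? (fun line =>
          if PySem.Str.startswith line "# " then some (PySem.Str.strip (PySem.Str.slice line (some 2) none))
          else none)).getD "" := by
  induction ls with
  | nil => simp [findTitleA]
  | cons l r ih =>
    simp only [findTitleA, List.findSome?_cons]
    by_cases h : PySem.Str.startswith l "# "
    · rw [if_pos h, if_pos h]; rfl
    · rw [if_neg h, if_neg h, ih]

theorem wc_eq (content : String) :
    (PySem.Str.split₀ content).length = (content.toList.foldl scanStep (false, 0)).2 := by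
  rw [PySem.Str.split₀, List.length_map, split₀_length_eq_scan]

-- ===== VERDICT (by name: the statement is the Claim_ definition above) =====
theorem extract_metadata_from_markdown_spec : Claim_equal_extract_metadata_from_markdown := by
  intro content _
  unfold Spec_extract_metadata_from_markdown
  simp only [extract_metadata_from_markdown, extract_metadata_from_markdown_alt,
    findTitleA_eq_findSome, wc_eq]
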